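-- pv_equiv track=rewrite | github.com/melbaa/bitburner_scripts | contract_math_expressions.py | f
-- ===== SOURCE A (Python) =====
-- opers = '+-*'  # and concat
--
-- def f(expr, digits):
--     if not digits:
--         return [expr]
--     res = []
--     if expr:
--         for op in opers:
--             newexpr = expr + op + digits[0]
--             newdigits = digits[1:]
--             res.extend(f(newexpr, newdigits))
--     newexpr = expr + digits[0]
--     newdigits = digits[1:]
--     res.extend(f(newexpr, newdigits))
--     return res
-- ===== SOURCE B (Python) =====
-- def f(expr, digits):
--     # Breadth-first: grow all partial expressions level by level instead of recursing.
--     res = [expr]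
--     empty = not expr
--     for d in digits:
--         ops = [''] if empty else ['+', '-', '*', '']
--         res = [s + op + d for s in res for op in ops]
--         empty = empty and not d
--     return res
-- ===== Notes on version B (the rewrite author's own statement) =====
-- stated objective: alternative
-- what changed: Replaced the DFS recursion with an iterative breadth-first enumeration: a single loop over digits grows all partial expressions level by level via a list comprehension, tracking 'prefix still empty' in a flag instead of re-testing expr in each recursive call.
import Mathlib
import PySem

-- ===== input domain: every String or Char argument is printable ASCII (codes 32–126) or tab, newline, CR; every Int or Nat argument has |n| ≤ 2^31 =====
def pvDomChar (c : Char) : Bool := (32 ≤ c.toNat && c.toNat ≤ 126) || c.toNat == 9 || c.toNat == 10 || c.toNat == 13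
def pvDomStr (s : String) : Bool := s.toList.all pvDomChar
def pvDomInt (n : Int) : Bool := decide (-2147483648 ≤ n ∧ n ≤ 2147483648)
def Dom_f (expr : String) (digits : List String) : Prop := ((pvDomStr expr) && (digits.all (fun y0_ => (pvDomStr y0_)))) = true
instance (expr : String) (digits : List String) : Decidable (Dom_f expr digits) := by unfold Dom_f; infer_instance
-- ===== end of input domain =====

-- B replaces A's DFS recursion by an iterative level-by-level (breadth-first) enumeration; same output list, same order.

-- ===== PORT A =====
-- opers = '+-*'
def opers : String := "+-*"

-- literal port of A: recursion on digits; for non-empty expr, loop over the three operators, then concat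
def f (expr : String) (digits : List String) : List String :=
  match digits with
  | [] => [expr]
  | d :: ds =>
    let res : List String := []
    let res := if expr ≠ "" then
        opers.toList.foldl (fun r op => r ++ f (expr ++ String.singleton op ++ d) ds) res
      else res
    res ++ f (expr ++ d) ds

-- ===== PORT B =====
-- literal port of B: fold over digits; state = (all partial expressions so far, "prefix still empty" flag)
def f_alt (expr : String) (digits : List String) : List String :=
  (digits.foldl
    (fun (st : List String × Bool) (d : String) =>
      let ops : List String := if st.2 then [""] else ["+", "-", "*", ""]
      (st.1.flatMap (fun s => ops.map (fun op => s ++ op ++ d)), st.2 && (d == "")))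
    ([expr], expr == "")).1

-- ===== PRECONDITION & SPEC =====
def Spec_f (expr : String) (digits : List String) (out : List String) : Prop := out = f_alt expr digits
instance (expr : String) (digits : List String) (out : List String) : Decidable (Spec_f expr digits out) := by unfold Spec_f; infer_instance

-- ===== CLAIM (what is proved, stated in full; the proofs are below) =====
def Claim_equal_f : Prop := ∀ (expr : String) (digits : List String), Dom_f expr digits → Spec_f expr digits (f expr digits)

-- ===== LEMMAS AND PROOFS =====

-- the pure list transform B performs once the flag is false
def gFold (l : List String) (ds : List String) : List String :=
  ds.foldl (fun l d => l.flatMap (fun s => ["+", "-", "*", ""].map (fun op => s ++ op ++ d))) l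

lemma append_ne_empty (e s : String) (h : e ≠ "") : e ++ s ≠ "" := by
  intro hc
  apply h
  have := congrArg String.toList hc
  simp at this
  exact this.1

lemma gFold_append (l1 l2 ds : List String) :
    gFold (l1 ++ l2) ds = gFold l1 ds ++ gFold l2 ds := by
  induction ds generalizing l1 l2 with
  | nil => rfl
  | cons d ds ih => simp [gFold, List.foldl_cons, List.flatMap_append] at *; exact ih _ _

lemma foldl_false (l ds : List String) :
    (ds.foldl
      (fun (st : List String × Bool) (d : String) =>
        let ops : List String := if st.2 then [""] else ["+", "-", "*", ""]
        (st.1.flatMap (fun s => ops.map (fun op => s ++ op ++ d)), st.2 && (d == "")))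
      (l, false)).1 = gFold l ds := by
  induction ds generalizing l with
  | nil => rfl
  | cons d ds ih => simpa [gFold, List.foldl_cons] using ih _

lemma f_nonempty (e : String) (he : e ≠ "") (ds : List String) :
    f e ds = gFold [e] ds := by
  induction ds generalizing e with
  | nil => rfl
  | cons d ds ih =>
    have h1 := ih (e ++ String.singleton '+' ++ d) (append_ne_empty _ _ (append_ne_empty _ _ he))
    have h2 := ih (e ++ String.singleton '-' ++ d) (append_ne_empty _ _ (append_ne_empty _ _ he))
    have h3 := ih (e ++ String.singleton '*' ++ d) (append_ne_empty _ _ (append_ne_empty _ _ he))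
    have h4 := ih (e ++ d) (append_ne_empty _ _ he)
    show (if e ≠ "" then
        opers.toList.foldl (fun r op => r ++ f (e ++ String.singleton op ++ d) ds) []
      else []) ++ f (e ++ d) ds = gFold [e] (d :: ds)
    rw [if_pos he]
    have hg : gFold [e] (d :: ds)
        = gFold [e ++ String.singleton '+' ++ d] ds ++ (gFold [e ++ String.singleton '-' ++ d] ds
          ++ (gFold [e ++ String.singleton '*' ++ d] ds ++ gFold [e ++ d] ds)) := by
      have h0 : gFold [e] (d :: ds)
          = gFold ([e ++ String.singleton '+' ++ d] ++ ([e ++ String.singleton '-' ++ d]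
            ++ ([e ++ String.singleton '*' ++ d] ++ [e ++ "" ++ d]))) ds := rfl
      rw [h0, gFold_append, gFold_append, gFold_append, String.append_empty]
    rw [hg, ← h1, ← h2, ← h3, ← h4]
    simp [opers]

lemma f_eq_alt (ds : List String) (e : String) : f e ds = f_alt e ds := by
  induction ds generalizing e with
  | nil => simp [f, f_alt]
  | cons d ds ih =>
    by_cases he : e = ""
    · subst he
      show ([] : List String) ++ f ("" ++ d) ds = f_alt "" (d :: ds)
      simp only [String.empty_append]
      rw [ih d]
      simp [f_alt, List.foldl_cons]
    · have hb : (e == "") = false := by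
        simp [he]
      rw [f_nonempty e he (d :: ds)]
      show _ = (((d :: ds).foldl _ ([e], e == ""))).1
      rw [hb, foldl_false]

-- ===== VERDICT (by name: the statement is the Claim_ definition above) =====
theorem f_spec : Claim_equal_f := by
  intro expr digits _
  simpa [Spec_f] using f_eq_alt digits expr
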